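-- pv_equiv track=rewrite | github.com/nobe0716/problem_solving | codejam/2019/qual/B. You Can Go Your Own Way.py | solve
-- ===== SOURCE A (Python) =====
-- def solve(l, seq):
--     s_of_seq = e_of_seq = 0
--     count = []
--     for e in seq:
--         if e == 'E':
--             e_of_seq += 1
--         if e == 'S':
--             s_of_seq += 1
--         count.append((e_of_seq, s_of_seq))
--
--     new = ''
--     s_of_new = e_of_new = 0
--     for i in range(2 * l - 2):
--         s_of_seq, e_of_seq = count[i]
--         if s_of_seq - s_of_new > e_of_seq - e_of_new:
--             s_of_new += 1
--             new += 'S'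
--         else:
--             e_of_new += 1
--             new += 'E'
--     return new
-- ===== SOURCE B (Python) =====
-- def solve(l, seq):
--     # Single fused pass: keep only two running differences instead of A's
--     # full prefix-count table and second greedy loop.
--     t = 0  # (#E - #S) among seq[0..i]
--     u = 0  # (#E - #S) among chars emitted so far
--     out = []
--     for i in range(2 * l - 2):
--         c = seq[i]
--         if c == 'E':
--             t += 1
--         elif c == 'S':
--             t -= 1
--         if t + u > 0:
--             u -= 1
--             out.append('S')
--         else:
--             u += 1
--             out.append('E')
--     return ''.join(out)
-- ===== Notes on version B (the rewrite author's own statement) =====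
-- stated objective: simpler
-- what changed: B drops A's O(n) prefix-count table and its two-counter greedy second pass, fusing everything into one loop that keeps just two running differences (#E-#S of the scanned prefix and of the emitted output) and decides each character from their sum.
import Mathlib
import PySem

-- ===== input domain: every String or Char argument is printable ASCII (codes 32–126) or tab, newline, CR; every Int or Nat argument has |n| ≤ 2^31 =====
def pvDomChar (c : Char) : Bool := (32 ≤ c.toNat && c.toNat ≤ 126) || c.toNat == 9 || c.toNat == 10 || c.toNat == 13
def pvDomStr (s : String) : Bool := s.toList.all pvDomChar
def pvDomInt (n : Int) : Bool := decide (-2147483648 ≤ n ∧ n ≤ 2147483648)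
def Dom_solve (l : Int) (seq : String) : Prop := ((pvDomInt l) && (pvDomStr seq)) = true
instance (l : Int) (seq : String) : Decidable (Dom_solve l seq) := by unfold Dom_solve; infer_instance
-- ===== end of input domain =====

-- B replaces A's prefix-count table + second greedy scan by one fused pass keeping
-- only two running differences (simpler, O(1) extra space besides the output).

-- ===== PORT A =====
-- loop bodies named for the proofs; each is the literal Python loop body
def stepA1 (st : Int × Int × List (Int × Int)) (e : Char) : Int × Int × List (Int × Int) :=
  let e_of := if e = 'E' then st.1 + 1 else st.1
  let s_of := if e = 'S' then st.2.1 + 1 else st.2.1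
  (e_of, s_of, st.2.2 ++ [(e_of, s_of)])

def stepA2 (count : List (Int × Int)) (st : List Char × Int × Int) (i : Int) : List Char × Int × Int :=
  match PySem.List.pyGet? count i with
  | none => st        -- count[i] raises IndexError in Python; excluded by Pre_solve
  | some p =>
    -- A's swapped tuple unpack: s_of_seq, e_of_seq = count[i]
    if p.1 - st.2.1 > p.2 - st.2.2 then (st.1 ++ ['S'], st.2.1 + 1, st.2.2)
    else (st.1 ++ ['E'], st.2.1, st.2.2 + 1)

def solve (l : Int) (seq : String) : String :=
  -- first loop: count = list of prefix pairs (e_of_seq, s_of_seq)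
  let count := (seq.toList.foldl stepA1 (0, 0, [])).2.2
  -- second loop: greedy over range(2*l-2); 'new' kept as List Char
  String.ofList (((PySem.List.pyRange 0 (2 * l - 2) 1).foldl (stepA2 count) ([], 0, 0)).1)

-- ===== PORT B =====
def stepB (seq : String) (st : Int × Int × List Char) (i : Int) : Int × Int × List Char :=
  match PySem.Str.pyGet? seq i with
  | none => st        -- seq[i] raises IndexError in Python; excluded by Pre_solve
  | some c =>
    let t := if c = 'E' then st.1 + 1 else if c = 'S' then st.1 - 1 else st.1
    if t + st.2.1 > 0 then (t, st.2.1 - 1, st.2.2 ++ ['S'])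
    else (t, st.2.1 + 1, st.2.2 ++ ['E'])

def solve_alt (l : Int) (seq : String) : String :=
  String.ofList (((PySem.List.pyRange 0 (2 * l - 2) 1).foldl (stepB seq) (0, 0, [])).2.2)


-- ===== PRECONDITION & SPEC =====
-- Pre_ excludes exactly the inputs where A (and B) raise IndexError: 2*l-2 positive yet longer than seq.
def Pre_solve (l : Int) (seq : String) : Prop :=
  2 * l - 2 ≤ (seq.toList.length : Int) ∨ 2 * l - 2 ≤ 0
instance (l : Int) (seq : String) : Decidable (Pre_solve l seq) := by unfold Pre_solve; infer_instance
def pvWitness_solve : Int × String := (2, "ES")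

def Spec_solve (l : Int) (seq : String) (out : String) : Prop := out = solve_alt l seq
instance (l : Int) (seq : String) (out : String) : Decidable (Spec_solve l seq out) := by unfold Spec_solve; infer_instance

-- ===== CLAIM (what is proved, stated in full; the proofs are below) =====
def Claim_equal_solve : Prop := ∀ (l : Int) (seq : String), Dom_solve l seq → Pre_solve l seq → Spec_solve l seq (solve l seq)

-- ===== LEMMAS AND PROOFS =====

-- integer counts of 'E' / 'S' in a character list
def cE (cs : List Char) : Int := (cs.count 'E' : Int)
def cS (cs : List Char) : Int := (cs.count 'S' : Int)

theorem cE_cons (c : Char) (ds : List Char) :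
    cE (c :: ds) = (if c = 'E' then 1 else 0) + cE ds := by
  by_cases h : c = 'E' <;> simp [cE, List.count_cons, h] <;> omega

theorem cS_cons (c : Char) (ds : List Char) :
    cS (c :: ds) = (if c = 'S' then 1 else 0) + cS ds := by
  by_cases h : c = 'S' <;> simp [cS, List.count_cons, h] <;> omega

-- the first A-loop builds exactly the prefix-count pairs
theorem countA (cs : List Char) (e0 s0 : Int) (acc : List (Int × Int)) :
    cs.foldl stepA1 (e0, s0, acc) =
      (e0 + cE cs, s0 + cS cs,
        acc ++ (List.range cs.length).map
          (fun j => (e0 + cE (cs.take (j + 1)), s0 + cS (cs.take (j + 1))))) := by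
  induction cs generalizing e0 s0 acc with
  | nil => simp [cE, cS]
  | cons c cs ih =>
    simp only [List.foldl_cons, stepA1]
    rw [ih]
    refine Prod.ext ?_ (Prod.ext ?_ ?_)
    · simp only [cE_cons]; split_ifs <;> ring
    · simp only [cS_cons]; split_ifs <;> ring
    · simp only [List.length_cons, List.range_succ_eq_map, List.map_cons, List.map_map,
        List.append_assoc, List.singleton_append, List.cons_eq_cons]
      refine congrArg (acc ++ ·) ?_
      rw [List.cons_eq_cons]
      constructor
      · refine Prod.ext ?_ ?_ <;>
          simp only [List.take_succ_cons, List.take_zero, cE_cons, cS_cons] <;>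
          · simp [cE, cS]; split_ifs <;> ring
      · apply List.map_congr_left
        intro j _
        simp only [Function.comp_apply, List.take_succ_cons, cE_cons, cS_cons]
        refine Prod.ext ?_ ?_ <;> simp <;> split_ifs <;> ring

-- the k-th entry of count
theorem count_get (cs : List Char) (k : Nat) (hk : k < cs.length) :
    PySem.List.pyGet? ((cs.foldl stepA1 (0, 0, [])).2.2) (k : Int) =
      some (cE (cs.take (k + 1)), cS (cs.take (k + 1))) := by
  rw [countA]
  simp [PySem.List.pyGet?_natCast, List.getElem?_map, List.getElem?_range hk]

theorem take_succ_getElem (cs : List Char) (k : Nat) (hk : k < cs.length) :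
    cs.take (k + 1) = cs.take k ++ [cs[k]] := by
  rw [List.take_succ, List.getElem?_eq_getElem hk]; rfl

-- the main loop invariant: after the first k steps the two greedy loops carry matching state
theorem main_inv (cs : List Char) (k : Nat) (hk : k ≤ cs.length) :
    ∃ o s e,
      (PySem.List.pyRange 0 (k : Int) 1).foldl
          (stepA2 ((cs.foldl stepA1 (0, 0, [])).2.2)) ([], 0, 0) = (o, s, e) ∧
      (PySem.List.pyRange 0 (k : Int) 1).foldl
          (stepB (String.ofList cs)) (0, 0, []) =
        (cE (cs.take k) - cS (cs.take k), e - s, o) := by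
  induction k with
  | zero =>
    refine ⟨[], 0, 0, ?_, ?_⟩ <;>
      simp [PySem.List.pyRange_one_eq_nil (by omega : (0:Int) ≤ 0), cE, cS]
  | succ k ih =>
    obtain ⟨o, s, e, hA, hB⟩ := ih (by omega)
    have hlt : k < cs.length := by omega
    have hsplit : PySem.List.pyRange 0 ((k + 1 : Nat) : Int) 1 =
        PySem.List.pyRange 0 (k : Int) 1 ++ [(k : Int)] := by
      have h1 : ((k + 1 : Nat) : Int) = (k : Int) + 1 := by push_cast; ring
      rw [h1, PySem.List.pyRange_one_succ_right (by omega)]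
    rw [hsplit, List.foldl_append, List.foldl_append, hA, hB,
        List.foldl_cons, List.foldl_cons, List.foldl_nil, List.foldl_nil]
    have hget := count_get cs k hlt
    have hgetB : PySem.Str.pyGet? (String.ofList cs) ((k : Nat) : Int) = some cs[k] := by
      simp [PySem.Str.pyGet?_natCast, List.getElem?_eq_getElem hlt]
    have htake := take_succ_getElem cs k hlt
    have hEk : cE (cs.take (k + 1)) = cE (cs.take k) + (if cs[k] = 'E' then 1 else 0) := by
      unfold cE
      rw [htake, List.count_append]
      by_cases h : cs[k] = 'E' <;> simp [List.count_cons, h]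
    have hSk : cS (cs.take (k + 1)) = cS (cs.take k) + (if cs[k] = 'S' then 1 else 0) := by
      unfold cS
      rw [htake, List.count_append]
      by_cases h : cs[k] = 'S' <;> simp [List.count_cons, h]
    unfold stepA2 stepB
    rw [hget, hgetB]
    have ht : (if cs[k] = 'E' then cE (cs.take k) - cS (cs.take k) + 1
        else if cs[k] = 'S' then cE (cs.take k) - cS (cs.take k) - 1
        else cE (cs.take k) - cS (cs.take k)) =
        cE (cs.take (k + 1)) - cS (cs.take (k + 1)) := by
      rw [hEk, hSk]
      by_cases h1 : cs[k] = 'E'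
      · have h2 : ¬ cs[k] = 'S' := by rw [h1]; decide
        simp only [if_pos h1, if_neg h2]; ring
      · by_cases h2 : cs[k] = 'S'
        · simp only [if_neg h1, if_pos h2]; ring
        · simp only [if_neg h1, if_neg h2]; ring
    simp only [ht]
    by_cases hc : cE (cs.take (k + 1)) - s > cS (cs.take (k + 1)) - e
    · rw [if_pos hc,
        if_pos (show cE (cs.take (k + 1)) - cS (cs.take (k + 1)) + (e - s) > 0 by omega)]
      exact ⟨o ++ ['S'], s + 1, e, rfl, Prod.ext rfl (Prod.ext (by ring) rfl)⟩
    · rw [if_neg hc,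
        if_neg (show ¬ (cE (cs.take (k + 1)) - cS (cs.take (k + 1)) + (e - s) > 0) by omega)]
      exact ⟨o ++ ['E'], s, e + 1, rfl, Prod.ext rfl (Prod.ext (by ring) rfl)⟩

-- ===== VERDICT (by name: the statement is the Claim_ definition above) =====
theorem solve_spec : Claim_equal_solve := by
  intro l seq _ hpre
  simp only [Spec_solve, solve, solve_alt]
  have hN : (2 * l - 2).toNat ≤ seq.toList.length := by
    unfold Pre_solve at hpre
    rcases hpre with h | h <;> omega
  obtain ⟨o, s, e, hA, hB⟩ := main_inv seq.toList (2 * l - 2).toNat hN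
  have hms : String.ofList seq.toList = seq := by simp
  rw [hms] at hB
  by_cases hpos : (0:Int) ≤ 2 * l - 2
  · rw [show (2 * l - 2 : Int) = (((2 * l - 2).toNat : Nat) : Int) by omega]
    rw [hA, hB]
  · rw [PySem.List.pyRange_one_eq_nil (by omega : (2 * l - 2 : Int) ≤ 0)]
    simp
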